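-- pv_equiv track=rewrite | github.com/alimtvnetwork/core-v8 | scripts/aaa_comments.py | insert_aaa_simple
-- ===== SOURCE A (Python) =====
-- def find_section_boundaries(body_lines: list[str]) -> tuple:
--     """
--     Find where Arrange ends, Act starts/ends, Assert starts.
--     Returns (arrange_end, act_start, assert_start) as line indices within body_lines.
--     Returns None if sections can't be determined.
--     """
--     n = len(body_lines)
--     if n == 0:
--         return None
--
--     # Find the first 'actual := args.Map' or 'actual :=' line
--     act_start = -1
--     for i, line in enumerate(body_lines):
--         s = line.strip()
--         if s.startswith('actual') and ':=' in s:
--             act_start = i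
--             break
--
--     # Find the first 'expected' line or ShouldBeEqual
--     assert_start = -1
--     for i, line in enumerate(body_lines):
--         s = line.strip()
--         if (s.startswith('expected') and ':=' in s) or '.ShouldBeEqual' in s or '.ShouldBeEqualMap' in s:
--             assert_start = i
--             break
--
--     # For loop-based tests with testCase.ShouldBeEqualMap
--     if assert_start == -1:
--         for i, line in enumerate(body_lines):
--             s = line.strip()
--             if 'ShouldBeEqualMap' in s or 'ShouldBeSafe' in s:
--                 assert_start = i
--                 break
--
--     return act_start, assert_start
--
-- def insert_aaa_simple(body_lines: list[str], base_indent: str) -> list[str]: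
--     """Insert AAA comments for simple (non-loop) test functions."""
--     boundaries = find_section_boundaries(body_lines)
--     if boundaries is None:
--         return body_lines
--
--     act_start, assert_start = boundaries
--
--     if act_start == -1 and assert_start == -1:
--         return body_lines
--
--     result = []
--     indent = base_indent + '\t'
--
--     # Determine arrange_end: everything before act_start that isn't blank
--     arrange_end = -1
--     if act_start > 0:
--         for i in range(act_start - 1, -1, -1):
--             if body_lines[i].strip():
--                 arrange_end = i
--                 break
--
--     # Insert comments
--     arrange_inserted = False
--     act_inserted = False
--     assert_inserted = False
--
--     for i, line in enumerate(body_lines):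
--         # Insert // Arrange before the first non-blank line if there's arrange content
--         if not arrange_inserted and i == 0 and act_start > 0:
--             # Check if first line is non-blank
--             first_content = -1
--             for j in range(len(body_lines)):
--                 if body_lines[j].strip() and not body_lines[j].strip().startswith('//'):
--                     first_content = j
--                     break
--             if first_content >= 0 and first_content < act_start:
--                 result.append(f'{indent}// Arrange')
--                 arrange_inserted = True
--
--         # Insert // Act before act_start
--         if not act_inserted and i == act_start:
--             if arrange_inserted:
--                 # Add blank line before Act if previous line isn't blank
--                 if result and result[-1].strip():
--                     result.append('')
--             result.append(f'{indent}// Act')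
--             act_inserted = True
--
--         # Insert // Assert before assert_start
--         if not assert_inserted and i == assert_start and assert_start != act_start:
--             if result and result[-1].strip():
--                 result.append('')
--             result.append(f'{indent}// Assert')
--             assert_inserted = True
--
--         result.append(line)
--
--     # If no arrange section (act is at line 0), just add Act and Assert
--     if not arrange_inserted and act_start == 0 and not act_inserted:
--         result.insert(0, f'{indent}// Act')
--
--     return result
-- ===== SOURCE B (Python) =====
-- def insert_aaa_simple(body_lines: list[str], base_indent: str) -> list[str]:
--     """Insert AAA comments for simple (non-loop) test functions.
--
--     Re-implementation: compute the (index, comment-chunk) insertion marks up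
--     front, then assemble the result by splicing slices of body_lines between
--     the marks -- no per-line state machine with inserted flags.
--     """
--     if not body_lines:
--         return body_lines
--
--     def first(pred):
--         return next((i for i, l in enumerate(body_lines) if pred(l.strip())), -1)
--
--     a = first(lambda t: t.startswith('actual') and ':=' in t)
--     s = first(lambda t: (t.startswith('expected') and ':=' in t)
--               or '.ShouldBeEqual' in t or '.ShouldBeEqualMap' in t)
--     if s == -1:
--         s = first(lambda t: 'ShouldBeEqualMap' in t or 'ShouldBeSafe' in t)
--     if a == -1 and s == -1:
--         return body_lines
--
--     indent = base_indent + '\t'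
--     arrange = a > 0 and any(t.strip() and not t.strip().startswith('//')
--                             for t in body_lines[:a])
--
--     marks = []
--     if arrange:
--         marks.append((0, [indent + '// Arrange']))
--     mark_a = None
--     if a >= 0:
--         blank = [''] if arrange and body_lines[a - 1].strip() else []
--         mark_a = (a, blank + [indent + '// Act'])
--     mark_s = None
--     if s >= 0 and s != a:
--         prev_nonblank = body_lines[s - 1].strip() if s > 0 else arrange
--         mark_s = (s, ([''] if prev_nonblank else []) + [indent + '// Assert'])
--     if mark_a and mark_s:
--         marks += [mark_a, mark_s] if a < s else [mark_s, mark_a]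
--     elif mark_a:
--         marks.append(mark_a)
--     elif mark_s:
--         marks.append(mark_s)
--
--     out, prev = [], 0
--     for p, chunk in marks:
--         out += body_lines[prev:p] + chunk
--         prev = p
--     return out + body_lines[prev:]
-- ===== Notes on version B (the rewrite author's own statement) =====
-- stated objective: alternative
-- what changed: B replaces A's stateful per-line loop (arrange/act/assert-inserted flags, result[-1] inspection, a dead post-loop insert) by staged passes: it precomputes an ordered list of (index, comment-chunk) insertion marks, each chunk's blank-line decision taken from the neighbouring body line alone, and then assembles the output by splicing body_lines slices between the marks.
import Mathlib
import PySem

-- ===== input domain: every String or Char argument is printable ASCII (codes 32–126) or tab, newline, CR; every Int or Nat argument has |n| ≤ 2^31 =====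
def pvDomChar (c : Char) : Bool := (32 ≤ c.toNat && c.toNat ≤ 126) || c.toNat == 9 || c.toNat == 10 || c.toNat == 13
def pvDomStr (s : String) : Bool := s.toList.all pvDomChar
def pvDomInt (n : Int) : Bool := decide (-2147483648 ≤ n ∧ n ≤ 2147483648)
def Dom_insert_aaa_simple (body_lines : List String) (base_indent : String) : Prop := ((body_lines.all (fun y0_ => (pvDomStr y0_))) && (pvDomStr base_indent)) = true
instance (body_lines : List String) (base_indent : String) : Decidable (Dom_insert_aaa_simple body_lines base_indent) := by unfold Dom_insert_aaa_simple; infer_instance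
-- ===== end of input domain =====

-- B replaces A's stateful per-line loop (inserted flags, result[-1] inspection) by staged
-- passes: it precomputes an ordered list of (index, comment-chunk) insertion marks and then
-- assembles the output by splicing body_lines slices between the marks (objective: alternative).

-- ===== PORT A =====

-- line predicates appearing verbatim in A
def pvActCond (line : String) : Bool :=
  PySem.Str.startswith (PySem.Str.strip line) "actual" && PySem.Str.isIn ":=" (PySem.Str.strip line)

def pvAssertCond (line : String) : Bool :=
  (PySem.Str.startswith (PySem.Str.strip line) "expected" && PySem.Str.isIn ":=" (PySem.Str.strip line))
  || PySem.Str.isIn ".ShouldBeEqual" (PySem.Str.strip line)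
  || PySem.Str.isIn ".ShouldBeEqualMap" (PySem.Str.strip line)

def pvFallbackCond (line : String) : Bool :=
  PySem.Str.isIn "ShouldBeEqualMap" (PySem.Str.strip line) || PySem.Str.isIn "ShouldBeSafe" (PySem.Str.strip line)

def pvContentCond (line : String) : Bool :=
  !(PySem.Str.strip line == "") && !(PySem.Str.startswith (PySem.Str.strip line) "//")

-- a 'for … in enumerate(…): if cond: v = i; break' scan, result -1 when nothing matches
def pvScanFirst (p : String → Bool) : List (Int × String) → Int
  | [] => -1
  | (i, l) :: rest => if p l then i else pvScanFirst p rest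

def find_section_boundaries (body_lines : List String) : Option (Int × Int) :=
  if body_lines.length = 0 then none
  else
    let act_start := pvScanFirst pvActCond (PySem.List.enumerate body_lines 0)
    let assert_start := pvScanFirst pvAssertCond (PySem.List.enumerate body_lines 0)
    let assert_start :=
      if assert_start = -1 then pvScanFirst pvFallbackCond (PySem.List.enumerate body_lines 0)
      else assert_start
    some (act_start, assert_start)

-- the backwards 'for i in range(act_start-1, -1, -1): … break' scan computing arrange_end
def pvArrangeEnd (body_lines : List String) : List Int → Int
  | [] => -1
  | i :: rest =>
      if !(PySem.Str.strip (PySem.List.pyGetD body_lines i "") == "") then i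
      else pvArrangeEnd body_lines rest

-- one iteration of A's main 'for i, line in enumerate(body_lines)' loop;
-- state = (result, arrange_inserted, act_inserted, assert_inserted)
def pvStep (body_lines : List String) (indent : String) (act_start assert_start : Int)
    (st : List String × Bool × Bool × Bool) (il : Int × String) : List String × Bool × Bool × Bool :=
  let result0 := st.1
  let arrI0 := st.2.1
  let actI0 := st.2.2.1
  let asrtI0 := st.2.2.2
  let i := il.1
  let line := il.2
  -- insert '// Arrange' before the first non-blank line if there's arrange content
  let arrFire := !arrI0 && (i == 0) && decide (0 < act_start) &&
      (let first_content := pvScanFirst pvContentCond (PySem.List.enumerate body_lines 0)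
       decide (0 ≤ first_content) && decide (first_content < act_start))
  let result1 := if arrFire then result0 ++ [indent ++ "// Arrange"] else result0
  let arrI1 := arrI0 || arrFire
  -- insert '// Act' before act_start
  let actFire := !actI0 && (i == act_start)
  let result2 :=
    if actFire then
      (if arrI1 && !result1.isEmpty && !(PySem.Str.strip (PySem.List.pyGetD result1 (-1) "") == "")
       then result1 ++ [""] else result1) ++ [indent ++ "// Act"]
    else result1
  let actI1 := actI0 || actFire
  -- insert '// Assert' before assert_start
  let asrtFire := !asrtI0 && (i == assert_start) && (assert_start != act_start)
  let result3 :=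
    if asrtFire then
      (if !result2.isEmpty && !(PySem.Str.strip (PySem.List.pyGetD result2 (-1) "") == "")
       then result2 ++ [""] else result2) ++ [indent ++ "// Assert"]
    else result2
  let asrtI1 := asrtI0 || asrtFire
  (result3 ++ [line], arrI1, actI1, asrtI1)

def insert_aaa_simple (body_lines : List String) (base_indent : String) : List String :=
  match find_section_boundaries body_lines with
  | none => body_lines
  | some (act_start, assert_start) =>
    if act_start = -1 ∧ assert_start = -1 then body_lines
    else
      let indent := base_indent ++ "\t"
      let _arrange_end :=
        if 0 < act_start then pvArrangeEnd body_lines (PySem.List.pyRange (act_start - 1) (-1) (-1))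
        else (-1 : Int)
      let st := (PySem.List.enumerate body_lines 0).foldl
        (pvStep body_lines indent act_start assert_start) ([], false, false, false)
      if !st.2.1 && (act_start == 0) && !st.2.2.1 then
        PySem.List.insert st.1 0 (indent ++ "// Act")
      else st.1

-- ===== PORT B =====

-- Source B's 'first(pred)': first index whose stripped line satisfies pred, else -1
def pvFirstB (pred : String → Bool) (body_lines : List String) : Int :=
  match body_lines.findIdx? (fun l => pred (PySem.Str.strip l)) with
  | none => -1
  | some j => (j : Int)

def insert_aaa_simple_alt (body_lines : List String) (base_indent : String) : List String :=
  if body_lines.isEmpty then body_lines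
  else
    let a := pvFirstB (fun t => PySem.Str.startswith t "actual" && PySem.Str.isIn ":=" t) body_lines
    let s := pvFirstB (fun t => (PySem.Str.startswith t "expected" && PySem.Str.isIn ":=" t)
               || PySem.Str.isIn ".ShouldBeEqual" t || PySem.Str.isIn ".ShouldBeEqualMap" t) body_lines
    let s := if s = -1 then pvFirstB (fun t => PySem.Str.isIn "ShouldBeEqualMap" t || PySem.Str.isIn "ShouldBeSafe" t) body_lines else s
    if a = -1 ∧ s = -1 then body_lines
    else
      let indent := base_indent ++ "\t"
      let arrange := decide (0 < a) && (PySem.List.slice body_lines none (some a)).any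
          (fun t => !(PySem.Str.strip t == "") && !(PySem.Str.startswith (PySem.Str.strip t) "//"))
      let marks0 : List (Int × List String) := if arrange then [((0 : Int), [indent ++ "// Arrange"])] else []
      let mark_a : Option (Int × List String) :=
        if 0 ≤ a then
          some (a, (if arrange && !(PySem.Str.strip (PySem.List.pyGetD body_lines (a - 1) "") == "")
                    then [""] else []) ++ [indent ++ "// Act"])
        else none
      let mark_s : Option (Int × List String) :=
        if 0 ≤ s ∧ s ≠ a then
          some (s, (if (if 0 < s then !(PySem.Str.strip (PySem.List.pyGetD body_lines (s - 1) "") == "") else arrange)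
                    then [""] else []) ++ [indent ++ "// Assert"])
        else none
      let marks := marks0 ++
        (match mark_a, mark_s with
         | some ma, some ms => if a < s then [ma, ms] else [ms, ma]
         | some ma, none => [ma]
         | none, some ms => [ms]
         | none, none => [])
      let st := marks.foldl (fun (st : List String × Int) m =>
          (st.1 ++ PySem.List.slice body_lines (some st.2) (some m.1) ++ m.2, m.1)) ([], (0 : Int))
      st.1 ++ PySem.List.slice body_lines (some st.2) none

-- ===== PRECONDITION & SPEC =====
def Spec_insert_aaa_simple (body_lines : List String) (base_indent : String) (out : List String) : Prop := out = insert_aaa_simple_alt body_lines base_indent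
instance (body_lines : List String) (base_indent : String) (out : List String) : Decidable (Spec_insert_aaa_simple body_lines base_indent out) := by unfold Spec_insert_aaa_simple; infer_instance

-- ===== CLAIM (what is proved, stated in full; the proofs are below) =====
def Claim_equal_insert_aaa_simple : Prop := ∀ (body_lines : List String) (base_indent : String), Dom_insert_aaa_simple body_lines base_indent → Spec_insert_aaa_simple body_lines base_indent (insert_aaa_simple body_lines base_indent)

-- ===== LEMMAS AND PROOFS =====

-- everything A's loop inserts before body_lines[i], decided from indices alone
-- (proof-internal bridge between A's loop and B's marks)
def pvInsertsBefore (body_lines : List String) (indent : String) (act_start assert_start : Int)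
    (arrange : Bool) (i : Int) : List String :=
  (if (i == 0) && arrange then [indent ++ "// Arrange"] else []) ++
  (if i == act_start then
     (if arrange && !(PySem.Str.strip (PySem.List.pyGetD body_lines (act_start - 1) "") == "")
      then [""] else []) ++ [indent ++ "// Act"]
   else []) ++
  (if (i == assert_start) && (assert_start != act_start) then
     (if (if 0 < i then !(PySem.Str.strip (PySem.List.pyGetD body_lines (i - 1) "") == "") else arrange)
      then [""] else []) ++ [indent ++ "// Assert"]
   else [])

-- the comment chunks a marks list contributes just before line i
def pvChunksOf (marks : List (Int × List String)) (i : Int) : List String :=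
  marks.flatMap (fun m => if m.1 == i then m.2 else [])

theorem pvScanFirst_cons (p : String → Bool) (i : Int) (l : String) (rest : List (Int × String)) :
    pvScanFirst p ((i, l) :: rest) = if p l then i else pvScanFirst p rest := rfl

theorem pvScanFirst_nil (p : String → Bool) : pvScanFirst p [] = -1 := rfl

-- a first-match scan in terms of findIdx?
theorem pv_scan_eq (p : String → Bool) (xs : List String) (s : Int) :
    pvScanFirst p (PySem.List.enumerate xs s) =
      (match xs.findIdx? p with | none => -1 | some j => s + (j : Int)) := by
  induction xs generalizing s with
  | nil => simp [PySem.List.enumerate_nil, pvScanFirst_nil]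
  | cons x xs ih =>
    rw [PySem.List.enumerate_cons]
    by_cases hp : p x
    · simp [pvScanFirst_cons, hp, List.findIdx?_cons]
    · simp only [pvScanFirst_cons, hp, List.findIdx?_cons, ih, if_false, Bool.false_eq_true]
      cases hfi : xs.findIdx? p <;> simp <;> try (push_cast; ring)

-- any-on-a-prefix in terms of findIdx?
theorem pv_any_take (p : String → Bool) (xs : List String) (m : Nat) :
    (xs.take m).any p = true ↔ ∃ j, xs.findIdx? p = some j ∧ j < m := by
  induction xs generalizing m with
  | nil => simp
  | cons x xs ih =>
    cases m with
    | zero => simp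
    | succ m =>
      by_cases hp : p x
      · simp [hp, List.findIdx?_cons]
      · simp [hp, List.findIdx?_cons, ih]

-- A's first_content test equals B's precomputed arrange flag
theorem pv_arrange_eq (body_lines : List String) (a : Int) :
    (decide (0 < a) &&
      (decide (0 ≤ pvScanFirst pvContentCond (PySem.List.enumerate body_lines 0)) &&
       decide (pvScanFirst pvContentCond (PySem.List.enumerate body_lines 0) < a)))
    = (decide (0 < a) && (PySem.List.slice body_lines none (some a)).any pvContentCond) := by
  by_cases ha : 0 < a
  · rw [PySem.List.slice_to _ (by omega : (0:Int) ≤ a), pv_scan_eq]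
    cases hfi : body_lines.findIdx? pvContentCond with
    | none =>
      have hany : (body_lines.take a.toNat).any pvContentCond = false := by
        rw [Bool.eq_false_iff]
        intro h
        obtain ⟨j', hj', _⟩ := (pv_any_take pvContentCond body_lines a.toNat).mp h
        rw [hfi] at hj'; cases hj'
      simp [hany]
    | some j =>
      by_cases hj : (j : Int) < a
      · have hany : (body_lines.take a.toNat).any pvContentCond = true :=
          (pv_any_take pvContentCond body_lines a.toNat).mpr ⟨j, hfi, by omega⟩
        simp [hany, hj]
      · have hany : (body_lines.take a.toNat).any pvContentCond = false := by
          rw [Bool.eq_false_iff]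
          intro h
          obtain ⟨j', hj', hm⟩ := (pv_any_take pvContentCond body_lines a.toNat).mp h
          rw [hfi] at hj'; cases hj'; omega
        simp [hany, hj]
  · simp [ha]

-- strip of a string containing a non-space character is non-empty
theorem pv_strip_append_ne (s t : String) (c : Char) (hc : c ∈ t.toList)
    (hsp : PySem.Chars.isspace c = false) :
    (PySem.Str.strip (s ++ t) == "") = false := by
  rw [beq_eq_false_iff_ne]
  intro h
  have h2 : PySem.Chars.strip ((s ++ t).toList) = [] := by
    rw [← PySem.Str.toList_strip, h]; rfl
  unfold PySem.Chars.strip PySem.Chars.rstrip PySem.Chars.lstrip at h2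
  rw [List.reverse_eq_nil_iff, List.dropWhile_eq_nil_iff] at h2
  have hall : ∀ x ∈ (s ++ t).toList, PySem.Chars.isspace x = true := by
    intro x hx
    rw [← List.takeWhile_append_dropWhile (p := PySem.Chars.isspace) (l := (s ++ t).toList)] at hx
    rcases List.mem_append.mp hx with hx | hx
    · exact List.mem_takeWhile_imp hx
    · exact h2 x (List.mem_reverse.mpr hx)
  have hmem : c ∈ (s ++ t).toList := by
    rw [String.toList_append]
    exact List.mem_append.mpr (Or.inr hc)
  rw [hall c hmem] at hsp
  cases hsp

-- one step of A's loop at index 0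
theorem pv_step_zero (body indent : _) (a_s as_s : Int) (arr : Bool) (x : String)
    (harr : (decide (0 < a_s) &&
      (decide (0 ≤ pvScanFirst pvContentCond (PySem.List.enumerate body 0)) &&
       decide (pvScanFirst pvContentCond (PySem.List.enumerate body 0) < a_s))) = arr) :
    pvStep body indent a_s as_s ([], false, false, false) (0, x)
      = (pvInsertsBefore body indent a_s as_s arr 0 ++ [x], arr,
         decide (0 ≤ a_s ∧ a_s < 1), decide (0 ≤ as_s ∧ as_s < 1 ∧ as_s ≠ a_s)) := by
  unfold pvStep pvInsertsBefore
  by_cases ha : a_s = 0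
  · have harr' : arr = false := by subst ha; simpa using harr.symm
    subst ha harr'
    simp
    refine ⟨by simp [show ¬((0:Int) = as_s ∧ ¬as_s = 0) from by omega], ?_⟩
    by_cases hb : as_s = 0 <;> by_cases hc : 0 ≤ as_s <;> by_cases hd : as_s < 1 <;>
      simp [hb, hc, hd] <;> omega
  · have e1 : (!false && ((0:Int) == 0) && decide (0 < a_s) &&
        (decide (0 ≤ pvScanFirst pvContentCond (PySem.List.enumerate body 0)) &&
         decide (pvScanFirst pvContentCond (PySem.List.enumerate body 0) < a_s))) = arr := by
      rw [← harr]; simp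
    have hstrip : (PySem.Str.strip (indent ++ "// Arrange") == "") = false :=
      pv_strip_append_ne indent "// Arrange" '/' (by decide) (by decide)
    simp only [e1]
    have ha' : ¬ (0:Int) = a_s := fun h => ha h.symm
    have hg : PySem.List.pyGetD [indent ++ "// Arrange"] (-1) "" = indent ++ "// Arrange" := rfl
    cases arr with
    | false =>
      simp [ha']
      refine ⟨?_, ?_⟩
      · rw [Bool.eq_iff_iff]; simp; omega
      · rw [Bool.eq_iff_iff]; simp; omega
    | true =>
      simp [ha', hg, hstrip]
      refine ⟨by split <;> simp, ?_, ?_⟩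
      · rw [Bool.eq_iff_iff]; simp; omega
      · rw [Bool.eq_iff_iff]; simp; omega

-- one step of A's loop at index k ≥ 1
set_option maxHeartbeats 1000000 in
theorem pv_step_succ (body indent : _) (a_s as_s : Int) (arr : Bool) (res : List String)
    (k : Nat) (x : String) (hk : 1 ≤ k) (hres : res ≠ [])
    (hlast : PySem.List.pyGetD res (-1) "" = PySem.List.pyGetD body ((k : Int) - 1) "") :
    pvStep body indent a_s as_s
        (res, arr, decide (0 ≤ a_s ∧ a_s < (k : Int)), decide (0 ≤ as_s ∧ as_s < (k : Int) ∧ as_s ≠ a_s))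
        ((k : Int), x)
      = (res ++ pvInsertsBefore body indent a_s as_s arr (k : Int) ++ [x], arr,
         decide (0 ≤ a_s ∧ a_s < (k : Int) + 1), decide (0 ≤ as_s ∧ as_s < (k : Int) + 1 ∧ as_s ≠ a_s)) := by
  have hk0 : (((k : Nat) : Int) == 0) = false := by simp; omega
  have hkpos : (0 : Int) < (k : Int) := by exact_mod_cast hk
  have hie : res.isEmpty = false := by simp [hres]
  unfold pvStep pvInsertsBefore
  by_cases hA : ((k : Int)) = a_s
  · subst hA
    have hf1 : decide (0 ≤ (k : Int) ∧ (k : Int) < (k : Int)) = false := by simp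
    have hx : ¬(((k : Int)) = as_s ∧ ¬as_s = (k : Int)) := by omega
    simp [hk0, hie, hlast, hf1, hkpos, hx] <;>
      (try refine ⟨?_, ?_, ?_⟩) <;> (try refine ⟨?_, ?_⟩) <;>
      first
        | rfl
        | (rw [Bool.eq_iff_iff]; simp; omega)
        | ((split <;> (first | omega | ((try split) <;> simp))); done)
        | omega
  · have hf2 : (((k : Int)) == a_s) = false := by simp [hA]
    by_cases hB : ((k : Int)) = as_s
    · subst hB
      have hf3 : decide (0 ≤ (k : Int) ∧ (k : Int) < (k : Int) ∧ ((k : Int)) ≠ a_s) = false := by simp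
      have hf4 : ((((k : Int))) != a_s) = true := by simp [hA]
      have hkN : 0 < k := hk
      simp [hk0, hie, hlast, hf2, hf3, hf4, hkN]
      refine ⟨?_, ?_, hA⟩
      · split <;> simp
      · rw [Bool.eq_iff_iff]; simp; omega
    · have hf5 : (((k : Int)) == as_s) = false := by simp [hB]
      simp [hk0, hie, hlast, hf2, hf5, hkpos] <;>
        (try refine ⟨?_, ?_, ?_⟩) <;> (try refine ⟨?_, ?_⟩) <;>
        first
          | rfl
          | (rw [Bool.eq_iff_iff]; simp; omega)
          | ((split <;> (first | omega | ((try split) <;> simp))); done)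
          | omega

-- A's loop over indices k, k+1, … builds the flatten of pvInsertsBefore, given the invariant
theorem pv_loop_suffix (body indent : _) (a_s as_s : Int) (arr : Bool)
    (rest : List String) (k : Nat) (res : List String)
    (hk : 1 ≤ k) (hdrop : body.drop k = rest) (hres : res ≠ [])
    (hlast : PySem.List.pyGetD res (-1) "" = PySem.List.pyGetD body ((k : Int) - 1) "") :
    (PySem.List.enumerate rest (k : Int)).foldl (pvStep body indent a_s as_s)
        (res, arr, decide (0 ≤ a_s ∧ a_s < (k : Int)), decide (0 ≤ as_s ∧ as_s < (k : Int) ∧ as_s ≠ a_s))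
      = (res ++ (PySem.List.enumerate rest (k : Int)).flatMap
            (fun il => pvInsertsBefore body indent a_s as_s arr il.1 ++ [il.2]),
         arr, decide (0 ≤ a_s ∧ a_s < (k : Int) + rest.length),
         decide (0 ≤ as_s ∧ as_s < (k : Int) + rest.length ∧ as_s ≠ a_s)) := by
  induction rest generalizing k res with
  | nil => simp [PySem.List.enumerate_nil]
  | cons x rest ih =>
    have hx : body[k]? = some x := by
      have h0 : (body.drop k)[0]? = some x := by rw [hdrop]; rfl
      simpa [List.getElem?_drop] using h0
    have hdrop' : body.drop (k + 1) = rest := by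
      have : (body.drop k).drop 1 = rest := by rw [hdrop]; rfl
      rwa [List.drop_drop] at this
    rw [PySem.List.enumerate_cons, List.foldl_cons,
      pv_step_succ body indent a_s as_s arr res k x hk hres hlast]
    have hres' : res ++ pvInsertsBefore body indent a_s as_s arr (k : Int) ++ [x] ≠ [] := by simp
    have hlast' : PySem.List.pyGetD (res ++ pvInsertsBefore body indent a_s as_s arr (k : Int) ++ [x]) (-1) ""
        = PySem.List.pyGetD body (((k + 1 : Nat) : Int) - 1) "" := by
      rw [PySem.List.pyGetD_neg_one_append_singleton]
      have : (((k + 1 : Nat) : Int) - 1) = ((k : Nat) : Int) := by push_cast; ring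
      rw [this, PySem.List.pyGetD_natCast]
      simp [List.getD, hx]
    have hmain := ih (k + 1) (res ++ pvInsertsBefore body indent a_s as_s arr (k : Int) ++ [x])
      (by omega) hdrop' hres' hlast'
    push_cast at hmain
    rw [hmain]
    push_cast
    simp only [Prod.mk.injEq]
    refine ⟨?_, trivial, ?_, ?_⟩
    · simp [List.append_assoc]
    · rw [Bool.eq_iff_iff]; simp; omega
    · rw [Bool.eq_iff_iff]; simp; omega

-- A's whole loop builds the flatten of pvInsertsBefore
theorem pv_loop_main (body indent : _) (a_s as_s : Int) (arr : Bool) (hne : body ≠ [])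
    (harr : (decide (0 < a_s) &&
      (decide (0 ≤ pvScanFirst pvContentCond (PySem.List.enumerate body 0)) &&
       decide (pvScanFirst pvContentCond (PySem.List.enumerate body 0) < a_s))) = arr) :
    (PySem.List.enumerate body 0).foldl (pvStep body indent a_s as_s) ([], false, false, false)
      = ((PySem.List.enumerate body 0).flatMap
            (fun il => pvInsertsBefore body indent a_s as_s arr il.1 ++ [il.2]),
         arr, decide (0 ≤ a_s ∧ a_s < (body.length : Int)),
         decide (0 ≤ as_s ∧ as_s < (body.length : Int) ∧ as_s ≠ a_s)) := by
  cases body with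
  | nil => exact absurd rfl hne
  | cons x rest =>
    rw [PySem.List.enumerate_cons, List.foldl_cons,
      pv_step_zero (x :: rest) indent a_s as_s arr x harr]
    have h1 := pv_loop_suffix (x :: rest) indent a_s as_s arr rest 1
      (pvInsertsBefore (x :: rest) indent a_s as_s arr 0 ++ [x]) (le_refl 1) rfl (by simp)
      (by rw [PySem.List.pyGetD_neg_one_append_singleton]
          norm_num [PySem.List.pyGetD_zero_cons])
    push_cast at h1
    rw [show ((0:Int) + 1) = 1 from by ring, h1]
    simp only [Prod.mk.injEq]
    refine ⟨?_, trivial, ?_, ?_⟩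
    · simp [List.append_assoc]
    · rw [Bool.eq_iff_iff]; simp; omega
    · rw [Bool.eq_iff_iff]; simp; omega

-- flatten with no chunks is the lines themselves
theorem pv_flatMap_lines (xs : List String) (s : Int) :
    (PySem.List.enumerate xs s).flatMap (fun il => [il.2]) = xs := by
  induction xs generalizing s with
  | nil => simp [PySem.List.enumerate_nil]
  | cons x xs ih => simp [PySem.List.enumerate_cons, ih]

-- B's splice fold equals the flatten of the marks' chunks
theorem pv_splice (body : List String) (marks : List (Int × List String)) (k : Nat) (acc : List String)
    (hb : ∀ m ∈ marks, (k : Int) ≤ m.1 ∧ m.1 < (body.length : Int))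
    (hsort : marks.Pairwise (fun m1 m2 => m1.1 ≤ m2.1)) :
    (let st := marks.foldl (fun (st : List String × Int) m =>
        (st.1 ++ PySem.List.slice body (some st.2) (some m.1) ++ m.2, m.1)) (acc, (k : Int));
     st.1 ++ PySem.List.slice body (some st.2) none)
    = acc ++ (PySem.List.enumerate (body.drop k) (k : Int)).flatMap
        (fun il => pvChunksOf marks il.1 ++ [il.2]) := by
  induction marks generalizing k acc with
  | nil =>
    simp only [List.foldl_nil, PySem.List.slice_from_natCast]
    have := pv_flatMap_lines (body.drop k) (k : Int)
    simp [pvChunksOf, this]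
  | cons m rest ih =>
    obtain ⟨p, c⟩ := m
    obtain ⟨hkp, hpn⟩ := hb (p, c) (by simp)
    have hp0 : 0 ≤ p := le_trans (by positivity) hkp
    obtain ⟨pN, rfl⟩ : ∃ pN : Nat, p = (pN : Int) := ⟨p.toNat, by omega⟩
    have hrest : ∀ m ∈ rest, (pN : Int) ≤ m.1 ∧ m.1 < (body.length : Int) := by
      intro m hm
      exact ⟨(List.pairwise_cons.mp hsort).1 m hm, (hb m (by simp [hm])).2⟩
    have hkpN : k ≤ pN := by omega
    have hpNn : pN < body.length := by omega
    simp only [List.foldl_cons]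
    rw [show (acc ++ PySem.List.slice body (some (k:Int)) (some (pN:Int)) ++ c, ((pN:Nat):Int)) =
      (acc ++ PySem.List.slice body (some ((k:Nat):Int)) (some ((pN:Nat):Int)) ++ c, ((pN:Nat):Int)) from rfl]
    rw [ih pN _ hrest (List.pairwise_cons.mp hsort).2]
    -- now rewrite the RHS
    rw [PySem.List.slice_natCast]
    -- decompose body.drop k
    have hsplit : body.drop k = (body.drop k).take (pN - k) ++ body.drop pN := by
      rw [show pN = k + (pN - k) from by omega, ← List.drop_drop]
      rw [show (k + (pN - k) - k) = pN - k from by omega, List.take_append_drop]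
    conv_rhs => rw [hsplit]
    rw [PySem.List.enumerate_append, List.flatMap_append]
    have hlen : ((body.drop k).take (pN - k)).length = pN - k := by
      rw [List.length_take, List.length_drop]; omega
    have hidx : ((k : Int) + (((body.drop k).take (pN - k)).length : Int)) = (pN : Int) := by
      rw [hlen]; omega
    rw [hidx]
    -- first part: all chunks vanish
    have h1 : (PySem.List.enumerate ((body.drop k).take (pN - k)) (k : Int)).flatMap
        (fun il => pvChunksOf ((((pN:Nat):Int), c) :: rest) il.1 ++ [il.2])
        = (PySem.List.enumerate ((body.drop k).take (pN - k)) (k : Int)).flatMap (fun il => [il.2]) := by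
      apply List.flatMap_congr
      intro il hmem
      obtain ⟨j, hj, hil⟩ := (PySem.List.mem_enumerate_iff _ _ _).mp hmem
      subst hil
      have hjlt : (k : Int) + (j : Int) < (pN : Int) := by
        have := hj; rw [hlen] at this; omega
      have hz : pvChunksOf ((((pN:Nat):Int), c) :: rest) ((k : Int) + (j : Int)) = [] := by
        simp only [pvChunksOf, List.flatMap_cons]
        rw [if_neg (by simp; omega)]
        simp only [List.nil_append]
        apply List.flatMap_eq_nil_iff.mpr
        intro m hm
        rw [if_neg]
        simp
        have := (hrest m hm).1
        omega
      rw [hz, List.nil_append]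
    rw [h1, pv_flatMap_lines]
    -- second part: drop pN = body[pN] :: drop (pN+1)
    rw [List.drop_eq_getElem_cons hpNn, PySem.List.enumerate_cons, List.flatMap_cons, List.flatMap_cons]
    have hhead : pvChunksOf ((((pN:Nat):Int), c) :: rest) ((pN:Nat):Int)
        = c ++ pvChunksOf rest ((pN:Nat):Int) := by
      simp [pvChunksOf]
    have htail : (PySem.List.enumerate (body.drop (pN + 1)) (((pN:Nat):Int) + 1)).flatMap
        (fun il => pvChunksOf ((((pN:Nat):Int), c) :: rest) il.1 ++ [il.2])
        = (PySem.List.enumerate (body.drop (pN + 1)) (((pN:Nat):Int) + 1)).flatMap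
        (fun il => pvChunksOf rest il.1 ++ [il.2]) := by
      apply List.flatMap_congr
      intro il hmem
      obtain ⟨j, hj, hil⟩ := (PySem.List.mem_enumerate_iff _ _ _).mp hmem
      subst hil
      simp only [pvChunksOf, List.flatMap_cons]
      rw [if_neg (by simp; omega)]
      rfl
    rw [hhead, htail]
    simp [List.append_assoc]

-- A's per-index inserts coincide with B's marks' chunks at every index ≥ 0
theorem pv_inserts_eq_chunks (body : List String) (indent : String) (a s : Int) (arr : Bool)
    (harr : arr = true → 0 < a) (i : Int) (hi : 0 ≤ i) :
    pvInsertsBefore body indent a s arr i =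
      pvChunksOf ((if arr then [((0 : Int), [indent ++ "// Arrange"])] else []) ++
        (match (if 0 ≤ a then
                  some (a, (if arr && !(PySem.Str.strip (PySem.List.pyGetD body (a - 1) "") == "")
                            then [""] else []) ++ [indent ++ "// Act"]) else none),
               (if 0 ≤ s ∧ s ≠ a then
                  some (s, (if (if 0 < s then !(PySem.Str.strip (PySem.List.pyGetD body (s - 1) "") == "") else arr)
                            then [""] else []) ++ [indent ++ "// Assert"]) else none) with
         | some ma, some ms => if a < s then [ma, ms] else [ms, ma]
         | some ma, none => [ma]
         | none, some ms => [ms]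
         | none, none => [])) i := by
  have harrChunk : pvChunksOf (if arr then [((0 : Int), [indent ++ "// Arrange"])] else []) i
      = (if (i == 0) && arr then [indent ++ "// Arrange"] else []) := by
    cases arr <;> by_cases h0 : i = 0 <;> simp [pvChunksOf, h0] <;> simp [eq_comm, h0]
  -- the Act chunk
  set CA := (if arr && !(PySem.Str.strip (PySem.List.pyGetD body (a - 1) "") == "")
             then [""] else []) ++ [indent ++ "// Act"] with hCA
  have hactChunk : (if i == a then CA else [])
      = (if 0 ≤ a then (if a == i then CA else []) else []) := by
    by_cases hA : 0 ≤ a <;> by_cases hia : i = a <;> simp [hA, hia] <;> omega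
  have hasrtChunk : (if (i == s) && (s != a) then
        (if (if 0 < i then !(PySem.Str.strip (PySem.List.pyGetD body (i - 1) "") == "") else arr)
         then [""] else []) ++ [indent ++ "// Assert"] else [])
      = (if 0 ≤ s ∧ s ≠ a then
          (if s == i then
            (if (if 0 < s then !(PySem.Str.strip (PySem.List.pyGetD body (s - 1) "") == "") else arr)
             then [""] else []) ++ [indent ++ "// Assert"] else []) else []) := by
    by_cases hS : 0 ≤ s ∧ s ≠ a
    · by_cases his : i = s
      · subst his; simp [hS, hS.2]
      · simp [hS, his]
        omega
    · simp only [if_neg hS]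
      rw [if_neg]
      simp only [Bool.and_eq_true, beq_iff_eq, bne_iff_ne, not_and]
      intro h1 h2
      exact absurd ⟨by omega, h2⟩ hS
  rw [pvInsertsBefore, pvChunksOf, List.flatMap_append, ← pvChunksOf, ← pvChunksOf, harrChunk, ← hCA]
  rw [hactChunk, hasrtChunk, List.append_assoc]
  congr 1
  by_cases hA : 0 ≤ a <;> by_cases hS : 0 ≤ s ∧ s ≠ a
  · simp only [if_pos hA, if_pos hS]
    by_cases hlt : a < s
    · simp only [if_pos hlt, pvChunksOf, List.flatMap_cons, List.flatMap_nil, List.append_nil]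
    · simp only [if_neg hlt, pvChunksOf, List.flatMap_cons, List.flatMap_nil, List.append_nil]
      by_cases hia : a = i
      · have hsi : (s == i) = false := by simp; omega
        simp [hia, hsi]
      · have hia' : (a == i) = false := by simp [hia]
        simp [hia']
  · simp only [if_pos hA, if_neg hS, pvChunksOf, List.flatMap_cons, List.flatMap_nil, List.append_nil]
  · simp only [if_neg hA, if_pos hS, pvChunksOf, List.flatMap_cons, List.flatMap_nil,
      List.append_nil, List.nil_append]
  · simp only [if_neg hA, if_neg hS, pvChunksOf, List.flatMap_nil, List.append_nil]

theorem pv_firstB_eq (p : String → Bool) (xs : List String) :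
    pvFirstB p xs = pvScanFirst (fun l => p (PySem.Str.strip l)) (PySem.List.enumerate xs 0) := by
  rw [pv_scan_eq]
  unfold pvFirstB
  cases h : xs.findIdx? (fun l => p (PySem.Str.strip l)) <;> simp [h]

-- scan result is -1 or a valid index

theorem pv_scan_bounds (p : String → Bool) (xs : List String) :
    pvScanFirst p (PySem.List.enumerate xs 0) = -1 ∨
      (0 ≤ pvScanFirst p (PySem.List.enumerate xs 0) ∧
       pvScanFirst p (PySem.List.enumerate xs 0) < (xs.length : Int)) := by
  rw [pv_scan_eq]
  cases h : xs.findIdx? p with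
  | none => left; rfl
  | some j =>
    right
    have := List.findIdx?_eq_some_iff_findIdx_eq.mp h
    simp; omega

-- the marks list is index-sorted and in range

-- the marks list is index-sorted and in range
theorem pv_marks_bounds (body : List String) (indent : String) (a s : Int) (arr : Bool)
    (ha : a = -1 ∨ (0 ≤ a ∧ a < (body.length : Int)))
    (hs : s = -1 ∨ (0 ≤ s ∧ s < (body.length : Int)))
    (harr : arr = true → 0 < a) (hn : body.length ≠ 0) :
    (∀ m ∈ ((if arr then [((0 : Int), [indent ++ "// Arrange"])] else []) ++
        (match (if 0 ≤ a then
                  some (a, (if arr && !(PySem.Str.strip (PySem.List.pyGetD body (a - 1) "") == "")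
                            then [""] else []) ++ [indent ++ "// Act"]) else none),
               (if 0 ≤ s ∧ s ≠ a then
                  some (s, (if (if 0 < s then !(PySem.Str.strip (PySem.List.pyGetD body (s - 1) "") == "") else arr)
                            then [""] else []) ++ [indent ++ "// Assert"]) else none) with
         | some ma, some ms => if a < s then [ma, ms] else [ms, ma]
         | some ma, none => [ma]
         | none, some ms => [ms]
         | none, none => [])), (0 : Int) ≤ m.1 ∧ m.1 < (body.length : Int)) ∧
    ((if arr then [((0 : Int), [indent ++ "// Arrange"])] else []) ++
        (match (if 0 ≤ a then
                  some (a, (if arr && !(PySem.Str.strip (PySem.List.pyGetD body (a - 1) "") == "")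
                            then [""] else []) ++ [indent ++ "// Act"]) else none),
               (if 0 ≤ s ∧ s ≠ a then
                  some (s, (if (if 0 < s then !(PySem.Str.strip (PySem.List.pyGetD body (s - 1) "") == "") else arr)
                            then [""] else []) ++ [indent ++ "// Assert"]) else none) with
         | some ma, some ms => if a < s then [ma, ms] else [ms, ma]
         | some ma, none => [ma]
         | none, some ms => [ms]
         | none, none => [])).Pairwise (fun m1 m2 => m1.1 ≤ m2.1) := by
  have hnz : (0 : Int) < (body.length : Int) := by
    have : 0 < body.length := Nat.pos_of_ne_zero hn
    exact_mod_cast this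
  rcases ha with rfl | ⟨ha0, halt⟩ <;> rcases hs with rfl | ⟨hs0, hslt⟩
  · cases arr
    · simp
    · exact absurd (harr rfl) (by omega)
  · have hsne : ¬ s = (-1 : Int) := by omega
    cases arr
    · simp_all [List.pairwise_cons]
    · exact absurd (harr rfl) (by omega)
  · cases arr
    · simp_all [List.pairwise_cons]
    · have hpos := harr rfl
      simp_all [List.pairwise_cons]
  · by_cases hsa : s = a
    · cases arr
      · simp_all [List.pairwise_cons]
      · have hpos := harr rfl
        simp_all [List.pairwise_cons]
    · by_cases hlt : a < s
      · cases arr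
        · simp only [if_pos hlt]
          simp_all [List.pairwise_cons]
          omega
        · have hpos := harr rfl
          simp only [if_pos hlt]
          simp_all [List.pairwise_cons]
          omega
      · cases arr
        · simp only [if_neg hlt]
          simp_all [List.pairwise_cons]
        · have hpos := harr rfl
          simp only [if_neg hlt]
          simp_all [List.pairwise_cons]

-- ===== VERDICT (by name: the statement is the Claim_ definition above) =====
theorem insert_aaa_simple_spec : Claim_equal_insert_aaa_simple := by
  intro body base _
  unfold Spec_insert_aaa_simple
  by_cases hb : body = []
  · subst hb; rfl
  · have hlen : body.length ≠ 0 := by simpa [List.length_eq_zero_iff] using hb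
    have hie : body.isEmpty = false := by simp [hb]
    set a_s := pvScanFirst pvActCond (PySem.List.enumerate body 0) with ha_s
    set asr0 := pvScanFirst pvAssertCond (PySem.List.enumerate body 0) with hasr0
    set fb := pvScanFirst pvFallbackCond (PySem.List.enumerate body 0) with hfb0
    set as_s := (if asr0 = -1 then fb else asr0 : Int) with has_s
    set arr := decide (0 < a_s) && (PySem.List.slice body none (some a_s)).any pvContentCond with harrdef
    have e1 : (fun l => (fun t => PySem.Str.startswith t "actual" && PySem.Str.isIn ":=" t)
        (PySem.Str.strip l)) = pvActCond := rfl
    have e2 : (fun l => (fun t => (PySem.Str.startswith t "expected" && PySem.Str.isIn ":=" t)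
        || PySem.Str.isIn ".ShouldBeEqual" t || PySem.Str.isIn ".ShouldBeEqualMap" t)
        (PySem.Str.strip l)) = pvAssertCond := rfl
    have e3 : (fun l => (fun t => PySem.Str.isIn "ShouldBeEqualMap" t || PySem.Str.isIn "ShouldBeSafe" t)
        (PySem.Str.strip l)) = pvFallbackCond := rfl
    have hcc : (fun t => !(PySem.Str.strip t == "") && !(PySem.Str.startswith (PySem.Str.strip t) "//")) = pvContentCond := rfl
    by_cases hcase : a_s = -1 ∧ as_s = -1
    · -- both scans fail: both programs return body unchanged
      have hA0 : insert_aaa_simple body base = body := by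
        unfold insert_aaa_simple find_section_boundaries
        rw [← ha_s, ← hasr0, ← hfb0]
        simp [hb, hcase.1, ← has_s, hcase.2]
      have hB0 : insert_aaa_simple_alt body base = body := by
        unfold insert_aaa_simple_alt
        rw [pv_firstB_eq, pv_firstB_eq, pv_firstB_eq, e1, e2, e3, ← ha_s, ← hasr0, ← hfb0]
        simp [hie, ← has_s, hcase.1, hcase.2]
      rw [hA0, hB0]
    · -- the interesting case
      have harr : arr = true → 0 < a_s := by
        rw [harrdef]; intro h; simpa using (Bool.and_eq_true _ _ |>.mp h).1
      have hA : a_s = -1 ∨ (0 ≤ a_s ∧ a_s < (body.length : Int)) := by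
        rw [ha_s]; exact pv_scan_bounds pvActCond body
      have hS : as_s = -1 ∨ (0 ≤ as_s ∧ as_s < (body.length : Int)) := by
        rw [has_s]
        by_cases h : asr0 = -1
        · simp only [if_pos h]; rw [hfb0]; exact pv_scan_bounds pvFallbackCond body
        · simp only [if_neg h]; rw [hasr0]; exact pv_scan_bounds pvAssertCond body
      have hmain := pv_loop_main body (base ++ "\t") a_s as_s arr hb (by rw [harrdef]; exact pv_arrange_eq body a_s)
      have hcond : ¬((arr = false ∧ a_s = 0) ∧ (a_s < 0 ∨ (body.length : Int) ≤ a_s)) := by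
        rintro ⟨⟨-, h0⟩, hor⟩
        omega
      -- A's value is the flatten of its per-index inserts
      have h1 : insert_aaa_simple body base
          = (PySem.List.enumerate body 0).flatMap
              (fun il => pvInsertsBefore body (base ++ "\t") a_s as_s arr il.1 ++ [il.2]) := by
        unfold insert_aaa_simple find_section_boundaries
        rw [← ha_s, ← hasr0, ← hfb0]
        simp only [if_neg hlen, ← has_s, if_neg hcase]
        rw [hmain]
        simp [hcond]
      -- bounds and order of B's marks, and B's value as the flatten of the marks' chunks
      have hbnds := pv_marks_bounds body (base ++ "\t") a_s as_s arr hA hS harr hlen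
      have hsp := pv_splice body
        ((if arr then [((0 : Int), [(base ++ "\t") ++ "// Arrange"])] else []) ++
          (match (if 0 ≤ a_s then
                    some (a_s, (if arr && !(PySem.Str.strip (PySem.List.pyGetD body (a_s - 1) "") == "")
                              then [""] else []) ++ [(base ++ "\t") ++ "// Act"]) else none),
                 (if 0 ≤ as_s ∧ as_s ≠ a_s then
                    some (as_s, (if (if 0 < as_s then !(PySem.Str.strip (PySem.List.pyGetD body (as_s - 1) "") == "") else arr)
                              then [""] else []) ++ [(base ++ "\t") ++ "// Assert"]) else none) with
           | some ma, some ms => if a_s < as_s then [ma, ms] else [ms, ma]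
           | some ma, none => [ma]
           | none, some ms => [ms]
           | none, none => [])) 0 [] hbnds.1 hbnds.2
      simp only [Nat.cast_zero, List.drop_zero, List.nil_append] at hsp
      have h2 : insert_aaa_simple_alt body base
          = (PySem.List.enumerate body 0).flatMap
              (fun il => pvChunksOf
                ((if arr then [((0 : Int), [(base ++ "\t") ++ "// Arrange"])] else []) ++
                  (match (if 0 ≤ a_s then
                            some (a_s, (if arr && !(PySem.Str.strip (PySem.List.pyGetD body (a_s - 1) "") == "")
                                      then [""] else []) ++ [(base ++ "\t") ++ "// Act"]) else none),
                         (if 0 ≤ as_s ∧ as_s ≠ a_s then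
                            some (as_s, (if (if 0 < as_s then !(PySem.Str.strip (PySem.List.pyGetD body (as_s - 1) "") == "") else arr)
                                      then [""] else []) ++ [(base ++ "\t") ++ "// Assert"]) else none) with
                   | some ma, some ms => if a_s < as_s then [ma, ms] else [ms, ma]
                   | some ma, none => [ma]
                   | none, some ms => [ms]
                   | none, none => [])) il.1 ++ [il.2]) := by
        unfold insert_aaa_simple_alt
        rw [pv_firstB_eq, pv_firstB_eq, pv_firstB_eq, e1, e2, e3, ← ha_s, ← hasr0, ← hfb0]
        simp only [hie, Bool.false_eq_true, if_false, ← has_s, if_neg hcase]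
        rw [hcc, ← harrdef]
        exact hsp
      rw [h1, h2]
      apply List.flatMap_congr
      intro il hmem
      obtain ⟨k, hk, hil⟩ := (PySem.List.mem_enumerate_iff _ _ _).mp hmem
      subst hil
      rw [pv_inserts_eq_chunks body (base ++ "\t") a_s as_s arr harr ((0 : Int) + (k : Int)) (by omega)]
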